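-- pv_equiv track=rewrite | github.com/pvankumar2410/mypythonlab | 3rd 1.py | alphabet_wars
-- ===== SOURCE A (Python) =====
-- def alphabet_wars(war):
--     count=0
--     left={'w' : 4,'p' : 3,'b' : 2,'s' : 1}
--     right={'m' : 4,'q' : 3,'d' : 2,'z' : 1}
--
--     for i in war:
--         if i in left:
--             count = left[i] + count
--
--         elif i in right:
--             count = right[i] - count
--
--
--     if count < 0:
--          return "Right side wins"
--
--     if count > 0:
--          return "left side wins"
--
--     if count == 0:
--         return "Lets fight again"
-- ===== SOURCE B (Python) =====
-- def alphabet_wars(war):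
--     left = {'w': 4, 'p': 3, 'b': 2, 's': 1}
--     right = {'m': 4, 'q': 3, 'd': 2, 'z': 1}
--     flips = 0
--     total = 0
--     for ch in reversed(war):
--         sign = 1 if flips % 2 == 0 else -1
--         if ch in left:
--             total += left[ch] * sign
--         elif ch in right:
--             total += right[ch] * sign
--             flips += 1
--     if total < 0:
--         return "Right side wins"
--     if total > 0:
--         return "left side wins"
--     return "Lets fight again"
-- ===== Notes on version B (the rewrite author's own statement) =====
-- stated objective: alternative
-- what changed: Replaces the sign-flipping recurrence (count = right[i] - count) by a single reverse-order pass that sums each letter's value with a sign given by the parity of right-side letters seen so far, instead of mutating the accumulator through sign flips.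
import Mathlib
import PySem

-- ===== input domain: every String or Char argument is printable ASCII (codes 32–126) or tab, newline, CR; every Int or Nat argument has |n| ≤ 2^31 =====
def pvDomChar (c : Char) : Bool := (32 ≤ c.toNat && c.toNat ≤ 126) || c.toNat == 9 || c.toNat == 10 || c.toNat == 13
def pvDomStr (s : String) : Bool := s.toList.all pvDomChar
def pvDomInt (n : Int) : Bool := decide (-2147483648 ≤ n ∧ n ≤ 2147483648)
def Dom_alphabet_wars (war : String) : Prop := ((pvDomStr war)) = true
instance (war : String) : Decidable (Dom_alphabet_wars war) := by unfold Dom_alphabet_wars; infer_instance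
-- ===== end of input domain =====

-- B replaces A's sign-flipping accumulator recurrence by a reverse pass summing each
-- letter's value with a parity-of-right-letters sign (objective: alternative, same cost).

-- ===== PORT A =====
-- the two literal dicts both Pythons define
def pvLeft : PySem.Dict Char Int := PySem.Dict.ofList [('w',4),('p',3),('b',2),('s',1)]
def pvRight : PySem.Dict Char Int := PySem.Dict.ofList [('m',4),('q',3),('d',2),('z',1)]

-- A's loop body: 'if i in left: count = left[i]+count elif i in right: count = right[i]-count'
def pvStepA (count : Int) (i : Char) : Int :=
  match pvLeft.get? i with
  | some v => v + count
  | none =>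
    match pvRight.get? i with
    | some v => v - count
    | none => count

def alphabet_wars (war : String) : String :=
  let count := war.toList.foldl pvStepA 0
  if count < 0 then "Right side wins"
  else if count > 0 then "left side wins"
  else "Lets fight again"

-- ===== PORT B =====
-- B's loop body over reversed(war); state = (flips, total)
def pvStepB (st : Int × Int) (ch : Char) : Int × Int :=
  let sign : Int := if st.1 % 2 == 0 then 1 else -1
  match pvLeft.get? ch with
  | some v => (st.1, st.2 + v * sign)
  | none =>
    match pvRight.get? ch with
    | some v => (st.1 + 1, st.2 + v * sign)
    | none => st

def alphabet_wars_alt (war : String) : String :=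
  let r := war.toList.reverse.foldl pvStepB (0, 0)
  if r.2 < 0 then "Right side wins"
  else if r.2 > 0 then "left side wins"
  else "Lets fight again"

-- ===== PRECONDITION & SPEC =====
def Spec_alphabet_wars (war : String) (out : String) : Prop := out = alphabet_wars_alt war
instance (war : String) (out : String) : Decidable (Spec_alphabet_wars war out) := by unfold Spec_alphabet_wars; infer_instance

-- ===== CLAIM (what is proved, stated in full; the proofs are below) =====
def Claim_equal_alphabet_wars : Prop := ∀ (war : String), Dom_alphabet_wars war → Spec_alphabet_wars war (alphabet_wars war)

-- ===== LEMMAS AND PROOFS =====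
-- the sign B applies: +1 for even flip count, -1 for odd
def pvSgn (f : Int) : Int := if f % 2 == 0 then 1 else -1

theorem pvSgn_succ (f : Int) : pvSgn (f + 1) = -pvSgn f := by
  unfold pvSgn
  rcases Int.emod_two_eq f with h | h
  · have h1 : (f + 1) % 2 = 1 := by omega
    simp [h, h1]
  · have h1 : (f + 1) % 2 = 0 := by omega
    simp [h, h1]

-- invariant: A's forward fold from c equals B's reverse-pass total plus the parity sign times c
theorem pvKey : ∀ (l : List Char) (c : Int),
    l.foldl pvStepA c =
      (l.reverse.foldl pvStepB (0, 0)).2 + pvSgn (l.reverse.foldl pvStepB (0, 0)).1 * c := by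
  intro l
  induction l with
  | nil => intro c; simp [pvSgn]
  | cons x t ih =>
    intro c
    have hrev : (x :: t).reverse.foldl pvStepB (0, 0)
        = pvStepB (t.reverse.foldl pvStepB (0, 0)) x := by
      simp [List.foldl_append]
    rw [List.foldl_cons, ih (pvStepA c x), hrev]
    set st := t.reverse.foldl pvStepB (0, 0) with hst
    unfold pvStepA pvStepB
    cases hl : pvLeft.get? x with
    | some v => simp only [pvSgn]; ring
    | none =>
      simp only
      cases hr : pvRight.get? x with
      | some v =>
        rw [pvSgn_succ]
        simp only [pvSgn]
        ring
      | none => rfl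

-- ===== VERDICT (by name: the statement is the Claim_ definition above) =====
theorem alphabet_wars_spec : Claim_equal_alphabet_wars := by
  intro war _
  unfold Spec_alphabet_wars alphabet_wars alphabet_wars_alt
  have h := pvKey war.toList 0
  simp only [mul_zero, add_zero] at h
  simp only [h]
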